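-- pv_equiv track=rewrite | github.com/Daniil4949/aois_first_lab | main.py | multiplication
-- ===== SOURCE A (Python) =====
-- def multiplication(first_num, sec_num):
--     answer = ["0" for i in range(16)]
--     if (first_num < 0) or (sec_num < 0):
--         answer[0] = '1'
--     if (first_num < 0) and (sec_num < 0):
--         answer[0] = '0'
--     first_num, sec_num = abs(int(first_num)), abs(int(sec_num))
--     if abs(first_num * sec_num) > 32767:
--         return "You are out of range"
--     else:
--         temp_len_for_massive = len(convert(sec_num))
--         first_num, sec_num = to_straight_code(first_num), to_straight_code(sec_num)
--         for i in range(temp_len_for_massive):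
--             temp_mas = ['0' for i in range(16)]
--             overload = 0
--             for index in range(15):
--                 index = 15 - index
--                 temp_mas[index] = int(sec_num[15 - i]) * int(first_num[index])
--                 temp_f, temp_s = int(answer[index - i]), int(temp_mas[index])
--                 if temp_f + temp_s + overload < 2:
--                     answer[index - i] = str(temp_f + temp_s + overload)
--                     overload = 0
--                 elif temp_f + temp_s + overload == 2:
--                     answer[index - i] = '0'
--                     overload = 1
--                 else:
--                     answer[index - i] = '1'
--                     overload = 1
--         return "".join(answer)
--
-- def convert(n, base_system=2, head_system=10):
--     value = '0123456789'
--     if isinstance(n, str):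
--         n = float(n, head_system)
--     if n >= base_system:
--         return convert(n // base_system, base_system) + value[n % base_system]
--     else:
--         return value[n]
--
-- def to_straight_code(number):
--     str_code = ["0" for i in range(16)]
--     if number < 0:
--         number = abs(number)
--         str_code[0] = "1"
--     number = list(str(convert(number)))
--     for item in range(len(number)):
--         str_code[len(str_code) - (item + 1)] = number[len(number) - (item + 1)]
--     return str_code
-- ===== SOURCE B (Python) =====
-- def multiplication(first_num, sec_num):
--     # closed form: one multiply + direct 15-bit formatting instead of shift-and-add over 16-cell string arrays
--     sign = '1' if (first_num < 0) != (sec_num < 0) else '0'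
--     product = abs(int(first_num)) * abs(int(sec_num))
--     if product > 32767:
--         return "You are out of range"
--     return sign + ''.join('1' if (product >> (14 - k)) & 1 else '0' for k in range(15))
-- ===== Notes on version B (the rewrite author's own statement) =====
-- stated objective: simpler
-- what changed: B replaces A's 16-cell string arrays, binary-conversion helpers and nested shift-and-add loops with full-adder branching by one closed-form multiplication and direct 15-bit formatting (sign taken as XOR of the operand signs).
import Mathlib
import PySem

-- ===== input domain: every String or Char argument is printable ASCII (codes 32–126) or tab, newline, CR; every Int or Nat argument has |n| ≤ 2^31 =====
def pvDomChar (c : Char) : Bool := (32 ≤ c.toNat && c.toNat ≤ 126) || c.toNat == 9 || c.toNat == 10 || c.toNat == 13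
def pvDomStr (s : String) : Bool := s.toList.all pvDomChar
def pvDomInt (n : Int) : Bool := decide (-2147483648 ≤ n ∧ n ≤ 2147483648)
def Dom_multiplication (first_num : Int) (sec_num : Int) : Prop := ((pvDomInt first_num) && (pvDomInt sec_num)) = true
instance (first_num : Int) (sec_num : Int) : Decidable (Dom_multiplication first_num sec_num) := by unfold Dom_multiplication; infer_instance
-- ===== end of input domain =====

-- B replaces A's string-array shift-and-add by one closed-form multiply and direct 15-bit formatting (objective: simpler).

-- ===== PORT A =====

-- int(s); every argument it receives here is a single binary-digit string (so int() never raises)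
def pvInt (s : String) : Int := (PySem.Int.ofStr? s).getD 0

-- value[i] : Python's s[i] is a one-character string (none = IndexError, unreachable here)
def pvSub1 (s : String) (i : Int) : String := ((PySem.Str.pyGet? s i).map (fun c => String.ofList [c])).getD ""

-- convert(n) is only ever called with base_system=2, head_system=10 and an int n ≥ 0: the
-- isinstance-str branch is dead and is not ported; the recursion is ported step for step.
def convert (n : Int) : String :=
  if 2 ≤ n then
    convert (PySem.Int.floordiv n 2) ++ pvSub1 "0123456789" (PySem.Int.mod n 2)
  else pvSub1 "0123456789" n
termination_by n.toNat
decreasing_by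
  rw [PySem.Int.floordiv_eq_ediv_of_pos (by omega : (0:Int) < 2)]; omega

def to_straight_code (number : Int) : List String :=
  let str_code := List.replicate 16 "0"
  let p := if number < 0 then (|number|, PySem.List.pySetD str_code 0 "1") else (number, str_code)
  let digits := (convert p.1).toList.map (fun c => String.ofList [c])   -- list(str(convert(number)))
  (PySem.List.pyRange 0 (digits.length : Int) 1).foldl
    (fun sc item =>
      PySem.List.pySetD sc ((sc.length : Int) - (item + 1))
        (PySem.List.pyGetD digits ((digits.length : Int) - (item + 1)) "")) p.2

-- the body of A's inner `for index in range(15)` loop; state = (temp_mas, overload, answer)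
def mulInner (secC firstC : List String) (i : Int)
    (st : List String × Int × List String) (index0 : Int) : List String × Int × List String :=
  let index : Int := 15 - index0
  let temp_mas := PySem.List.pySetD st.1 index
    (PySem.Int.toStr (pvInt (PySem.List.pyGetD secC (15 - i) "") *
                      pvInt (PySem.List.pyGetD firstC index "")))
  let temp_f := pvInt (PySem.List.pyGetD st.2.2 (index - i) "")
  let temp_s := pvInt (PySem.List.pyGetD temp_mas index "")
  if temp_f + temp_s + st.2.1 < 2 then
    (temp_mas, 0, PySem.List.pySetD st.2.2 (index - i) (PySem.Int.toStr (temp_f + temp_s + st.2.1)))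
  else if temp_f + temp_s + st.2.1 = 2 then
    (temp_mas, 1, PySem.List.pySetD st.2.2 (index - i) "0")
  else
    (temp_mas, 1, PySem.List.pySetD st.2.2 (index - i) "1")

def multiplication (first_num : Int) (sec_num : Int) : String :=
  let answer := List.replicate 16 "0"
  let answer := if first_num < 0 ∨ sec_num < 0 then PySem.List.pySetD answer 0 "1" else answer
  let answer := if first_num < 0 ∧ sec_num < 0 then PySem.List.pySetD answer 0 "0" else answer
  let first := |first_num|
  let sec := |sec_num|
  if |first * sec| > 32767 then "You are out of range"
  else
    let temp_len := PySem.Str.len (convert sec)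
    let firstC := to_straight_code first
    let secC := to_straight_code sec
    let answer := (PySem.List.pyRange 0 temp_len 1).foldl (fun answer i =>
      ((PySem.List.pyRange 0 15 1).foldl (mulInner secC firstC i)
        (List.replicate 16 "0", 0, answer)).2.2) answer
    PySem.Str.join "" answer

-- ===== PORT B =====
def multiplication_alt (first_num : Int) (sec_num : Int) : String :=
  let sign := if (decide (first_num < 0)) != (decide (sec_num < 0)) then "1" else "0"
  let product := first_num.natAbs * sec_num.natAbs
  if product > 32767 then "You are out of range"
  else sign ++ PySem.Str.join "" ((PySem.List.pyRange 0 15 1).map (fun k =>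
      if (product >>> (14 - k).toNat) &&& 1 = 1 then "1" else "0"))

-- ===== PRECONDITION & SPEC =====
-- Pre_ excludes exactly the inputs where A raises IndexError (first_num = 0 with |sec_num| ≥ 2^18:
-- A's answer index 'index - i' then walks below -16 in the 16-cell list); A returns everywhere else in Dom.
def Pre_multiplication (first_num : Int) (sec_num : Int) : Prop :=
  ¬ (first_num = 0 ∧ 262144 ≤ |sec_num|)
instance (first_num : Int) (sec_num : Int) : Decidable (Pre_multiplication first_num sec_num) := by
  unfold Pre_multiplication; infer_instance
def pvWitness_multiplication : Int × Int := (3, -5)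

def Spec_multiplication (first_num : Int) (sec_num : Int) (out : String) : Prop :=
  out = multiplication_alt first_num sec_num
instance (first_num : Int) (sec_num : Int) (out : String) : Decidable (Spec_multiplication first_num sec_num out) := by
  unfold Spec_multiplication; infer_instance

-- ===== CLAIM (what is proved, stated in full; the proofs are below) =====
def Claim_equal_multiplication : Prop := ∀ (first_num : Int) (sec_num : Int),
  Dom_multiplication first_num sec_num → Pre_multiplication first_num sec_num →
  Spec_multiplication first_num sec_num (multiplication first_num sec_num)

-- ===== LEMMAS AND PROOFS =====

-- "0"/"1" cell for bit k of v
def bitS (v k : Nat) : String := if v.testBit k then "1" else "0"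
-- the 15 magnitude cells, most significant first (bits 14 .. 0)
def encL (v : Nat) : List String := (List.range 15).map (fun c => bitS v (14 - c))

-- ---- python index normalisation ----
def pvN (n : Nat) (i : Int) : Nat := if 0 ≤ i then i.toNat else n - (-i).toNat

theorem pvN_lt (n : Nat) (i : Int) (h1 : -(n:Int) ≤ i) (h2 : i < n) : pvN n i < n := by
  unfold pvN; split_ifs <;> omega

theorem pyGetD_pvN {α : Type} [Inhabited α] (xs : List α) (i : Int) (d : α)
    (h1 : -(xs.length:Int) ≤ i) (h2 : i < xs.length) :
    PySem.List.pyGetD xs i d = xs[pvN xs.length i]'(pvN_lt _ _ h1 h2) := by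
  simp only [PySem.List.pyGetD, PySem.List.pyGet?, PySem.List.pyIdx?, pvN]
  split_ifs with h
  · simp [List.getElem?_eq_getElem (show i.toNat < xs.length by omega)]
  · simp [List.getElem?_eq_getElem (show xs.length - (-i).toNat < xs.length by omega)]

theorem pySetD_pvN {α : Type} (xs : List α) (i : Int) (v : α)
    (h1 : -(xs.length:Int) ≤ i) (h2 : i < xs.length) :
    PySem.List.pySetD xs i v = xs.set (pvN xs.length i) v := by
  simp only [PySem.List.pySetD, PySem.List.pySet?, PySem.List.pyIdx?, pvN]
  split_ifs with h <;> rfl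

-- ---- cells ----
theorem pvInt_zero : pvInt "0" = 0 := by decide
theorem cell01_int {x : String} (h : x = "0" ∨ x = "1") : pvInt x = 0 ∨ pvInt x = 1 := by
  rcases h with h | h <;> subst h <;> [exact Or.inl (by decide); exact Or.inr (by decide)]
theorem toStr_cell {x : String} (h : x = "0" ∨ x = "1") : PySem.Int.toStr (pvInt x) = x := by
  rcases h with h | h <;> subst h <;> decide
theorem bitS01 (v k : Nat) : bitS v k = "0" ∨ bitS v k = "1" := by
  unfold bitS; split_ifs <;> simp
theorem encL_mem01 {v : Nat} {x : String} (h : x ∈ encL v) : x = "0" ∨ x = "1" := by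
  unfold encL at h
  rcases List.mem_map.mp h with ⟨c, -, rfl⟩
  exact bitS01 v (14 - c)
theorem encL_length (v : Nat) : (encL v).length = 15 := by
  simp [encL]
theorem encL_zero : encL 0 = List.replicate 15 "0" := by decide

-- ---- full adder ----
theorem pvAdder (v X b : Nat) :
    (v % 2^b + X % 2^b) / 2^b ≤ 1 ∧
    ((v/2^b)%2 + (X/2^b)%2 + (v % 2^b + X % 2^b) / 2^b) % 2 = (v+X)/2^b % 2 ∧
    ((v/2^b)%2 + (X/2^b)%2 + (v % 2^b + X % 2^b) / 2^b) / 2 = (v % (2^b*2) + X % (2^b*2)) / (2^b*2) := by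
  set q := 2^b with hq
  have hqpos : 0 < q := Nat.two_pow_pos b
  have hv2 : v % (q*2) = v % q + q * ((v/q)%2) := Nat.mod_mul ..
  have hx2 : X % (q*2) = X % q + q * ((X/q)%2) := Nat.mod_mul ..
  have hvq : v % q < q := Nat.mod_lt _ hqpos
  have hxq : X % q < q := Nat.mod_lt _ hqpos
  set bv := (v/q)%2 with hbv
  set bx := (X/q)%2 with hbx
  set c := (v % q + X % q) / q with hc
  set r := (v % q + X % q) % q with hr
  have hcr : v % q + X % q = q * c + r := (Nat.div_add_mod _ _).symm
  have hrq : r < q := Nat.mod_lt _ hqpos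
  have hc1 : c ≤ 1 := by
    have : (v % q + X % q) / q < 2 := (Nat.div_lt_iff_lt_mul hqpos).mpr (by omega)
    omega
  have hbv1 : bv ≤ 1 := Nat.le_of_lt_succ (Nat.mod_lt _ (by norm_num))
  have hbx1 : bx ≤ 1 := Nat.le_of_lt_succ (Nat.mod_lt _ (by norm_num))
  have hsum : v % (q*2) + X % (q*2) = q * (bv + bx + c) + r := by
    have h' : q*(bv+bx+c)+r = q*bv + q*bx + (q*c+r) := by ring
    rw [hv2, hx2, h', ← hcr]; omega
  have hdig : (v+X)/q % 2 = (v+X) % (q*2) / q := (Nat.mod_mul_right_div_self (v+X) q 2).symm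
  have hmod : (v+X) % (q*2) = (q * (bv + bx + c) + r) % (q*2) := by
    rw [Nat.add_mod, hsum]
  have h2q : 0 < q*2 := by omega
  have hK : ∀ K, K ≤ 3 → (q*K + r) % (q*2) / q = K % 2 ∧ (q*K+r)/(q*2) = K/2 := by
    intro K hK3
    interval_cases K
    · constructor
      · rw [show q*0+r = r by ring, Nat.mod_eq_of_lt (show r < q*2 by omega), Nat.div_eq_of_lt hrq]
      · rw [show q*0+r = r by ring, Nat.div_eq_of_lt (show r < q*2 by omega)]
    · constructor
      · rw [Nat.mod_eq_of_lt (show q*1+r < q*2 by omega), show q*1+r = r+q by ring,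
            Nat.add_div_right _ hqpos, Nat.div_eq_of_lt hrq]
      · rw [Nat.div_eq_of_lt (show q*1+r < q*2 by omega)]
    · constructor
      · rw [show q*2+r = r+q*2 by ring, Nat.add_mod_right, Nat.mod_eq_of_lt (show r < q*2 by omega),
            Nat.div_eq_of_lt hrq]
      · rw [show q*2+r = r+q*2 by ring, Nat.add_div_right _ h2q, Nat.div_eq_of_lt (show r < q*2 by omega)]
    · constructor
      · rw [show q*3+r = (r+q)+q*2 by ring, Nat.add_mod_right, Nat.mod_eq_of_lt (show r+q < q*2 by omega),
            Nat.add_div_right _ hqpos, Nat.div_eq_of_lt hrq]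
      · rw [show q*3+r = (r+q)+q*2 by ring, Nat.add_div_right _ h2q,
            Nat.div_eq_of_lt (show r+q < q*2 by omega)]
  refine ⟨hc1, ?_, ?_⟩
  · rw [hdig, hmod, (hK (bv+bx+c) (by omega)).1]
  · rw [hsum, (hK (bv+bx+c) (by omega)).2]


-- ---- convert ----
theorem convert_zero : convert 0 = "0" := by
  rw [convert.eq_def]; decide
theorem convert_one : convert 1 = "1" := by
  rw [convert.eq_def]; decide
theorem convert_rev (n : Nat) :
    1 ≤ (convert (n:Int)).toList.length ∧
    n < 2^((convert (n:Int)).toList.length) ∧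
    (2 ≤ n → 2^((convert (n:Int)).toList.length - 1) ≤ n) ∧
    (convert (n:Int)).toList.reverse
      = (List.range ((convert (n:Int)).toList.length)).map
          (fun j => if n.testBit j then '1' else '0') := by
  induction n using Nat.strong_induction_on with
  | _ n ih =>
    rcases Nat.lt_or_ge n 2 with h2 | h2
    · interval_cases n
      · rw [show ((0:Nat):Int) = 0 by rfl, convert_zero]
        exact ⟨by decide, by decide, by omega, by decide⟩
      · rw [show ((1:Nat):Int) = 1 by rfl, convert_one]
        exact ⟨by decide, by decide, by omega, by decide⟩
    · have hrw : convert (n:Int) = convert ((n/2 : Nat) : Int) ++ pvSub1 "0123456789" ((n % 2 : Nat) : Int) := by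
        rw [convert.eq_def, if_pos (by exact_mod_cast h2)]
        congr 2
        · rw [show ((2:Int)) = ((2:Nat):Int) from rfl, PySem.Int.floordiv_natCast]
        · rw [show ((2:Int)) = ((2:Nat):Int) from rfl, PySem.Int.mod_natCast]
      obtain ⟨ih1, ih2, ih3, ih4⟩ := ih (n/2) (by omega)
      have hd : (pvSub1 "0123456789" ((n % 2 : Nat) : Int)).toList = [if n.testBit 0 then '1' else '0'] := by
        rcases Nat.mod_two_eq_zero_or_one n with h | h <;> rw [h] <;>
          simp only [Nat.testBit_zero, h] <;> decide
      have hlist : (convert ↑n).toList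
          = (convert ↑(n/2)).toList ++ [if n.testBit 0 then '1' else '0'] := by
        rw [hrw, String.toList_append, hd]
      set L' := (convert ((n/2:Nat):Int)).toList.length with hL'
      have hL : (convert (n:Int)).toList.length = L' + 1 := by
        rw [hlist, List.length_append, List.length_singleton]
      have hps : (2:Nat)^(L'+1) = 2*2^L' := by ring
      refine ⟨by omega, by rw [hL]; omega, ?_, ?_⟩
      · intro
        rcases Nat.lt_or_ge (n/2) 2 with hs | hs
        · have h1 : n/2 = 1 := by omega
          have hL1 : L' = 1 := by
            rw [hL', h1, show ((1:Nat):Int) = 1 by rfl, convert_one]; decide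
          rw [hL, hL1]; omega
        · have h3 := ih3 hs
          have hq : (2:Nat)^L' = 2*2^(L'-1) := by
            rw [← pow_succ']; congr 1; omega
          rw [hL]; simp only [Nat.add_sub_cancel]
          omega
      · rw [hlist, List.reverse_append, List.reverse_singleton,
            show ((convert ↑(n/2)).toList ++ [if n.testBit 0 = true then '1' else '0']).length = L' + 1
              by rw [List.length_append, List.length_singleton],
            List.range_succ_eq_map, List.map_cons]
        simp only [List.singleton_append, List.map_map, ih4]
        congr 1
        apply List.map_congr_left
        intro j _
        simp only [Function.comp_apply, Nat.testBit_add_one]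

-- length bound from the 2^(L-1) ≤ n bound
theorem convert_len_le (n k : Nat) (hn : n < 2^k) (hk : 1 ≤ k) :
    (convert (n:Int)).toList.length ≤ k := by
  rcases convert_rev n with ⟨h1, -, h3, -⟩
  by_contra hgt
  rcases Nat.lt_or_ge n 2 with h2 | h2
  · -- n ≤ 1 : convert n is a single character
    have : (convert (n:Int)).toList.length = 1 := by
      interval_cases n
      · rw [show ((0:Nat):Int) = 0 by rfl, convert_zero]; decide
      · rw [show ((1:Nat):Int) = 1 by rfl, convert_one]; decide
    omega
  · have := h3 h2
    have hpow : (2:Nat)^k ≤ 2^((convert (n:Int)).toList.length - 1) :=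
      Nat.pow_le_pow_right (by norm_num) (by omega)
    omega

-- ---- to_straight_code ----
theorem tsc_eq (n : Nat) (hn : n < 2^15) : to_straight_code (n:Int) = "0" :: encL n := by
  have hneg : ¬ ((n:Int) < 0) := by omega
  unfold to_straight_code
  dsimp only
  rw [if_neg hneg]
  dsimp only
  obtain ⟨hL1, hlt, -, hrev⟩ := convert_rev n
  have hL15 : (convert (n:Int)).toList.length ≤ 15 := convert_len_le n 15 hn (by norm_num)
  set D := List.map (fun c => String.ofList [c]) (convert ↑n).toList with hD
  set L := (convert (n:Int)).toList.length with hLdef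
  have hDL : D.length = L := by rw [hD, List.length_map]
  rw [hDL]
  have hdig : ∀ item : Nat, item < L →
      PySem.List.pyGetD D ((L:Int) - ((item:Int) + 1)) "" = bitS n item := by
    intro item hit
    have hb1 : -((D.length:Int)) ≤ (L:Int) - ((item:Int)+1) := by rw [hDL]; omega
    have hb2 : (L:Int) - ((item:Int)+1) < (D.length:Int) := by rw [hDL]; omega
    rw [pyGetD_pvN D _ "" hb1 hb2]
    have hpv : pvN D.length ((L:Int) - ((item:Int)+1)) = L - 1 - item := by
      rw [hDL]; unfold pvN; split_ifs <;> omega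
    have hio : D[pvN D.length ((L:Int) - ((item:Int)+1))]'(pvN_lt _ _ hb1 hb2)
        = D[L - 1 - item]'(by rw [hDL]; omega) := by
      congr 1
    rw [hio]
    have hcq : (convert ↑n).toList[L - 1 - item]? = some (if n.testBit item then '1' else '0') := by
      have e1 : (convert ↑n).toList.reverse[item]? = (convert ↑n).toList[L - 1 - item]? := by
        rw [List.getElem?_reverse (by omega)]
      rw [← e1, hrev]
      simp [hit]
    have hDq : D[L - 1 - item]? = some (bitS n item) := by
      rw [hD, List.getElem?_map, hcq]
      unfold bitS; split_ifs <;> rfl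
    have hfin := List.getElem?_eq_getElem (l := D) (i := L - 1 - item) (by rw [hDL]; omega)
    rw [hfin] at hDq
    exact Option.some.inj hDq
  have main : ∀ m : Nat, m ≤ L →
      List.foldl (fun sc item => PySem.List.pySetD sc ((sc.length:Int) - (item + 1))
          (PySem.List.pyGetD D ((L:Int) - (item + 1)) "")) (List.replicate 16 "0")
        (PySem.List.pyRange 0 (m:Int) 1)
      = "0" :: (List.range 15).map (fun c => if 14 - c < m then bitS n (14-c) else "0") := by
    intro m
    induction m with
    | zero =>
      intro _
      rw [show ((0:Nat):Int) = 0 from rfl, PySem.List.pyRange_one_eq_nil (by omega), List.foldl_nil]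
      have hmap : (List.range 15).map (fun c => if 14 - c < 0 then bitS n (14-c) else "0")
          = (List.range 15).map (fun _ => "0") :=
        List.map_congr_left (fun c _ => if_neg (Nat.not_lt_zero _))
      rw [hmap, List.map_const']
      decide
    | succ m ihm =>
      intro hm1
      have hcast : ((m+1 : Nat):Int) = (m:Int)+1 := by push_cast; ring
      rw [hcast, PySem.List.pyRange_one_succ_right (by omega), List.foldl_append,
          ihm (by omega), List.foldl_cons, List.foldl_nil]
      have hm14 : m ≤ 14 := by omega
      set cur := "0" :: (List.range 15).map (fun c => if 14 - c < m then bitS n (14-c) else "0") with hcur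
      have hclen : cur.length = 16 := by simp [hcur]
      rw [hdig m (by omega)]
      rw [pySetD_pvN cur _ _ (by rw [hclen]; omega) (by rw [hclen]; omega)]
      have hpv : pvN cur.length ((cur.length:Int) - ((m:Int)+1)) = (14 - m) + 1 := by
        rw [hclen]; unfold pvN; split_ifs <;> omega
      rw [hpv, hcur, List.set_cons_succ]
      congr 1
      refine List.ext_getElem (by simp) ?_
      intro p hp1 hp2
      have hp15 : p < 15 := by simpa using hp2
      rw [List.getElem_set]
      split_ifs with he
      · simp only [List.getElem_map, List.getElem_range]
        rw [if_pos (by omega), show 14 - p = m by omega]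
      · simp only [List.getElem_map, List.getElem_range]
        by_cases hlt' : 14 - p < m
        · rw [if_pos hlt', if_pos (by omega)]
        · rw [if_neg hlt', if_neg (by omega)]
  rw [main L (le_refl L)]
  congr 1
  unfold encL
  apply List.map_congr_left
  intro c hc
  have hc15 : c < 15 := List.mem_range.mp hc
  by_cases h : 14 - c < L
  · rw [if_pos h]
  · rw [if_neg h]
    unfold bitS
    rw [Nat.testBit_lt_two_pow (lt_of_lt_of_le hlt (Nat.pow_le_pow_right (by norm_num) (by omega)))]
    rfl

theorem tsc_zero : to_straight_code 0 = List.replicate 16 "0" := by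
  have := tsc_eq 0 (by norm_num)
  simpa [encL_zero] using this

-- ---- the inner loop: identity portion ----
theorem pyGetD_pySetD_self {α : Type} [Inhabited α] (xs : List α) (iidx : Int) (v d : α)
    (h1 : -(xs.length:Int) ≤ iidx) (h2 : iidx < xs.length) :
    PySem.List.pyGetD (PySem.List.pySetD xs iidx v) iidx d = v := by
  rw [pySetD_pvN xs iidx v h1 h2]
  have hb1 : -(((xs.set (pvN xs.length iidx) v).length:Int)) ≤ iidx := by rw [List.length_set]; exact h1
  have hb2 : iidx < ((xs.set (pvN xs.length iidx) v).length:Int) := by rw [List.length_set]; exact h2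
  rw [pyGetD_pvN _ iidx d hb1 hb2]
  have hJ : pvN (xs.set (pvN xs.length iidx) v).length iidx = pvN xs.length iidx := by
    rw [List.length_set]
  have h? : (xs.set (pvN xs.length iidx) v)[pvN (xs.set (pvN xs.length iidx) v).length iidx]? = some v := by
    rw [hJ]; exact List.getElem?_set_self (pvN_lt _ _ h1 h2)
  rw [List.getElem?_eq_getElem (pvN_lt _ _ hb1 hb2)] at h?
  exact Option.some.inj h?

theorem pySetD_pyGetD_self {α : Type} [Inhabited α] (xs : List α) (iidx : Int) (d : α)
    (h1 : -(xs.length:Int) ≤ iidx) (h2 : iidx < xs.length) :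
    PySem.List.pySetD xs iidx (PySem.List.pyGetD xs iidx d) = xs := by
  rw [pyGetD_pvN xs iidx d h1 h2, pySetD_pvN xs iidx _ h1 h2]
  exact List.set_getElem_self (pvN_lt _ _ h1 h2)

theorem pyGetD_mem' {α : Type} [Inhabited α] (xs : List α) (iidx : Int) (d : α)
    (h1 : -(xs.length:Int) ≤ iidx) (h2 : iidx < xs.length) :
    PySem.List.pyGetD xs iidx d ∈ xs := by
  rw [pyGetD_pvN xs iidx d h1 h2]
  exact List.getElem_mem _

theorem mulInner_id_step (secC firstC : List String) (i : Int) (idx0 : Int) (tm ans : List String)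
    (htm : tm.length = 16) (hans : ans.length = 16) (hcells : ∀ x ∈ ans, x = "0" ∨ x = "1")
    (h0 : 0 ≤ idx0) (h14 : idx0 ≤ 14) (hi0 : 0 ≤ i) (hi : i ≤ 17)
    (hz : pvInt (PySem.List.pyGetD secC (15 - i) "") * pvInt (PySem.List.pyGetD firstC (15 - idx0) "") = 0) :
    mulInner secC firstC i (tm, 0, ans) idx0
      = (PySem.List.pySetD tm (15 - idx0) (PySem.Int.toStr 0), 0, ans) := by
  unfold mulInner
  dsimp only
  rw [hz]
  have hts : PySem.List.pyGetD (PySem.List.pySetD tm (15 - idx0) (PySem.Int.toStr 0)) (15 - idx0) ""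
      = PySem.Int.toStr 0 :=
    pyGetD_pySetD_self tm (15 - idx0) _ "" (by omega) (by omega)
  rw [hts]
  rw [show pvInt (PySem.Int.toStr 0) = 0 from by decide]
  rw [show pvInt (PySem.List.pyGetD ans (15 - idx0 - i) "") + 0 + 0
        = pvInt (PySem.List.pyGetD ans (15 - idx0 - i) "") from by ring]
  have hfmem : PySem.List.pyGetD ans (15 - idx0 - i) "" ∈ ans :=
    pyGetD_mem' ans _ "" (by omega) (by omega)
  have hfcell := hcells _ hfmem
  have hset : PySem.List.pySetD ans (15 - idx0 - i)
      (PySem.Int.toStr (pvInt (PySem.List.pyGetD ans (15 - idx0 - i) ""))) = ans := by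
    rw [toStr_cell hfcell]
    exact pySetD_pyGetD_self ans _ "" (by omega) (by omega)
  rcases cell01_int hfcell with hf | hf <;>
    rw [if_pos (by rw [hf]; norm_num)] <;> rw [hset]

theorem inner_id (secC firstC : List String) (i : Int) (k : Nat) (hk : k ≤ 15)
    (hi0 : 0 ≤ i) (hi : i ≤ 17)
    (hzero : ∀ index : Int, 1 ≤ index → index ≤ 15 - (k:Int) →
        pvInt (PySem.List.pyGetD secC (15 - i) "") * pvInt (PySem.List.pyGetD firstC index "") = 0)
    (tm ans : List String) (htm : tm.length = 16) (hans : ans.length = 16)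
    (hcells : ∀ x ∈ ans, x = "0" ∨ x = "1") :
    ((PySem.List.pyRange (k:Int) 15 1).foldl (mulInner secC firstC i) (tm, 0, ans)).1.length = 16 ∧
    ((PySem.List.pyRange (k:Int) 15 1).foldl (mulInner secC firstC i) (tm, 0, ans)).2.1 = 0 ∧
    ((PySem.List.pyRange (k:Int) 15 1).foldl (mulInner secC firstC i) (tm, 0, ans)).2.2 = ans := by
  have H : ∀ j k' : Nat, k' + j = 15 → ∀ tm' ans' : List String,
      tm'.length = 16 → ans'.length = 16 → (∀ x ∈ ans', x = "0" ∨ x = "1") →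
      (∀ index : Int, 1 ≤ index → index ≤ 15 - (k':Int) →
        pvInt (PySem.List.pyGetD secC (15 - i) "") * pvInt (PySem.List.pyGetD firstC index "") = 0) →
      ((PySem.List.pyRange (k':Int) 15 1).foldl (mulInner secC firstC i) (tm', 0, ans')).1.length = 16 ∧
      ((PySem.List.pyRange (k':Int) 15 1).foldl (mulInner secC firstC i) (tm', 0, ans')).2.1 = 0 ∧
      ((PySem.List.pyRange (k':Int) 15 1).foldl (mulInner secC firstC i) (tm', 0, ans')).2.2 = ans' := by
    intro j
    induction j with
    | zero =>
      intro k' hk' tm' ans' htm' hans' hc' hz'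
      rw [show ((k':Nat):Int) = 15 by omega, PySem.List.pyRange_one_eq_nil (by omega), List.foldl_nil]
      exact ⟨htm', rfl, rfl⟩
    | succ j ihj =>
      intro k' hk' tm' ans' htm' hans' hc' hz'
      rw [PySem.List.pyRange_one_cons (by omega), List.foldl_cons]
      rw [mulInner_id_step secC firstC i (k':Int) tm' ans' htm' hans' hc'
            (by omega) (by omega) hi0 hi (hz' (15 - (k':Int)) (by omega) (by omega))]
      rw [show ((k':Int) + 1) = ((k'+1 : Nat):Int) by push_cast; ring]
      exact ihj (k'+1) (by omega)
        (PySem.List.pySetD tm' (15 - (k':Int)) (PySem.Int.toStr 0)) ans'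
        (by rw [PySem.List.length_pySetD, htm']) hans' hc'
        (fun index h1 h2 => hz' index h1 (by push_cast at h2 ⊢; omega))
  exact H (15 - k) k (by omega) tm ans htm hans hcells hzero

-- ---- bit/cell numeric bridges ----
theorem encL_getElem (v c : Nat) (hc : c < 15) : (encL v)[c]'(by rw [encL_length]; omega) = bitS v (14 - c) := by
  unfold encL
  rw [List.getElem_map, List.getElem_range]

theorem pyGetD_cons15 (s : String) (l : List String) (hl : l.length = 15) (c : Nat) (hc : c < 15) :
    PySem.List.pyGetD (s :: l) ((c:Int)+1) "" = l[c]'(by omega) := by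
  have hlen : (s :: l).length = 16 := by rw [List.length_cons, hl]
  have hb1 : -(((s :: l).length:Int)) ≤ (c:Int)+1 := by rw [hlen]; omega
  have hb2 : (c:Int)+1 < ((s :: l).length:Int) := by rw [hlen]; omega
  rw [pyGetD_pvN _ _ _ hb1 hb2]
  have hpv : pvN (s :: l).length ((c:Int)+1) = c + 1 := by
    rw [hlen]; unfold pvN; split_ifs <;> omega
  have h? : (s :: l)[pvN (s :: l).length ((c:Int)+1)]? = some (l[c]'(by omega)) := by
    rw [hpv, List.getElem?_cons_succ]
    exact List.getElem?_eq_getElem (by omega)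
  rw [List.getElem?_eq_getElem (pvN_lt _ _ hb1 hb2)] at h?
  exact Option.some.inj h?

theorem pvInt_bitS (v k : Nat) : pvInt (bitS v k) = ((v / 2^k % 2 : Nat) : Int) := by
  unfold bitS
  rw [Nat.testBit_eq_decide_div_mod_eq]
  rcases Nat.mod_two_eq_zero_or_one (v / 2^k) with h | h <;> rw [h] <;> decide

theorem pvInt_toStr_digit (d : Nat) (hd : d ≤ 1) : pvInt (PySem.Int.toStr ((d:Nat):Int)) = d := by
  interval_cases d <;> decide

theorem bitS_toStr (w b : Nat) : PySem.Int.toStr ((w / 2^b % 2 : Nat) : Int) = bitS w b := by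
  unfold bitS
  rw [Nat.testBit_eq_decide_div_mod_eq]
  rcases Nat.mod_two_eq_zero_or_one (w / 2^b) with h | h <;> rw [h] <;> rfl

theorem bit_low (v a i j : Nat) (hj : j < i) : (v + a * 2^i).testBit j = v.testBit j := by
  rw [Nat.testBit_eq_decide_div_mod_eq, Nat.testBit_eq_decide_div_mod_eq]
  have hdecomp : a * 2^i = (a * 2^(i-j-1) * 2) * 2^j := by
    have h2 : (2:Nat)^i = 2^(i-j-1) * 2 * 2^j := by
      rw [← pow_succ, ← pow_add]
      congr 1; omega
    rw [h2]; ring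
  rw [hdecomp, Nat.add_mul_div_right _ _ (Nat.two_pow_pos j), Nat.mul_comm (a * 2^(i-j-1)) 2,
      ← Nat.add_mul_mod_self_left (v / 2^j) 2 (a * 2^(i-j-1))]

theorem branch_bridge (tm2 ansl : List String) (j : Int) (sn : Nat) (hs : sn ≤ 3) :
    (if ((sn:Nat):Int) < 2 then (tm2, (0:Int), PySem.List.pySetD ansl j (PySem.Int.toStr ((sn:Nat):Int)))
     else if ((sn:Nat):Int) = 2 then (tm2, (1:Int), PySem.List.pySetD ansl j "0")
     else (tm2, (1:Int), PySem.List.pySetD ansl j "1"))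
    = (tm2, ((sn/2 : Nat):Int), PySem.List.pySetD ansl j (PySem.Int.toStr ((sn % 2 : Nat):Int))) := by
  interval_cases sn
  · rw [if_pos (by norm_num)]; rfl
  · rw [if_pos (by norm_num)]; rfl
  · rw [if_neg (by norm_num), if_pos (by norm_num),
        show PySem.Int.toStr ((2 % 2 : Nat):Int) = "0" from by decide]
    norm_num
  · rw [if_neg (by norm_num), if_neg (by norm_num),
        show PySem.Int.toStr ((3 % 2 : Nat):Int) = "1" from by decide]
    norm_num

theorem phase1 (secC firstC : List String) (i : Nat) (hi : i ≤ 14)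
    (a v : Nat) (s : String)
    (hsec : pvInt (PySem.List.pyGetD secC (15 - (i:Int)) "") = 1)
    (hfc : firstC = "0" :: encL a) :
    ∀ k : Nat, k ≤ 15 - i → ∀ tm : List String, tm.length = 16 →
    ((PySem.List.pyRange 0 (k:Int) 1).foldl (mulInner secC firstC (i:Int)) (tm, 0, s :: encL v)).1.length = 16 ∧
    ((PySem.List.pyRange 0 (k:Int) 1).foldl (mulInner secC firstC (i:Int)) (tm, 0, s :: encL v)).2.1
        = (((v % 2^(i+k) + (a * 2^i) % 2^(i+k)) / 2^(i+k) : Nat) : Int) ∧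
    ((PySem.List.pyRange 0 (k:Int) 1).foldl (mulInner secC firstC (i:Int)) (tm, 0, s :: encL v)).2.2
        = s :: (List.range 15).map (fun c => if 14 - c < i + k then bitS (v + a * 2^i) (14 - c) else bitS v (14 - c)) := by
  intro k
  induction k with
  | zero =>
    intro hk tm htm
    rw [show ((0:Nat):Int) = 0 from rfl, PySem.List.pyRange_one_eq_nil (by omega), List.foldl_nil]
    refine ⟨htm, ?_, ?_⟩
    · have hX0 : (a * 2^i) % 2^i = 0 := Nat.mul_mod_left a (2^i)
      have h0 : (v % 2^i + (a * 2^i) % 2^i) / 2^i = 0 := by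
        rw [hX0, Nat.add_zero]
        exact Nat.div_eq_of_lt (Nat.mod_lt _ (Nat.two_pow_pos i))
      simp only [Nat.add_zero]
      rw [h0]
      rfl
    · dsimp only
      congr 1
      unfold encL
      refine List.map_congr_left ?_
      intro c hc
      have hc15 : c < 15 := List.mem_range.mp hc
      by_cases h : 14 - c < i + 0
      · rw [if_pos h]
        unfold bitS
        rw [bit_low v a i (14-c) (by omega)]
      · rw [if_neg h]
  | succ k ih =>
    intro hk tm htm
    obtain ⟨ih1, ih2, ih3⟩ := ih (by omega) tm htm
    have hk14 : k + i ≤ 14 := by omega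
    rw [show ((k+1:Nat):Int) = (k:Int)+1 from by push_cast; ring,
        PySem.List.pyRange_one_succ_right (by omega), List.foldl_append, List.foldl_cons, List.foldl_nil]
    set R := (PySem.List.pyRange 0 (k:Int) 1).foldl (mulInner secC firstC (i:Int)) (tm, 0, s :: encL v) with hR
    unfold mulInner
    dsimp only
    rw [ih3, ih2, hsec, hfc, one_mul]
    rw [show (15 - (k:Int)) = (((14-k:Nat)):Int)+1 from by omega]
    rw [pyGetD_cons15 _ _ (encL_length a) (14-k) (by omega)]
    rw [encL_getElem a (14-k) (by omega), show 14 - (14-k) = k from by omega, pvInt_bitS a k]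
    rw [show ((((14-k:Nat)):Int)+1 - (i:Int)) = ((14-k-i : Nat):Int)+1 from by omega]
    rw [pyGetD_cons15 _ _ (by rw [List.length_map, List.length_range]) (14-k-i) (by omega)]
    rw [List.getElem_map, List.getElem_range]
    rw [show 14 - (14-k-i) = i + k from by omega, if_neg (lt_irrefl _), pvInt_bitS v (i+k)]
    rw [pyGetD_pySetD_self R.1 _ _ "" (by rw [ih1]; omega) (by rw [ih1]; omega)]
    rw [pvInt_toStr_digit (a / 2^k % 2) (by omega)]
    rw [show ((v / 2^(i+k) % 2 : Nat):Int) + ((a / 2^k % 2 : Nat):Int)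
          + (((v % 2^(i+k) + a * 2^i % 2^(i+k)) / 2^(i+k) : Nat):Int)
        = (((v / 2^(i+k) % 2) + (a / 2^k % 2) + ((v % 2^(i+k) + a * 2^i % 2^(i+k)) / 2^(i+k)) : Nat):Int)
        from by push_cast; ring]
    have hXd : a * 2^i / 2^(i+k) = a / 2^k := by
      rw [pow_add, Nat.mul_comm a (2^i), Nat.mul_div_mul_left _ _ (Nat.two_pow_pos i)]
    have hadder := pvAdder v (a * 2^i) (i+k)
    rw [hXd] at hadder
    obtain ⟨hcle, hdig, hcar⟩ := hadder
    rw [branch_bridge _ _ _ _ (by omega)]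
    have hp2 : (2:Nat)^(i+k)*2 = 2^(i+(k+1)) := by
      rw [← pow_succ]; congr 1
    rw [hp2] at hcar
    dsimp only
    refine ⟨?_, ?_, ?_⟩
    · simp only [PySem.List.length_pySetD]; exact ih1
    · exact congrArg (fun t : Nat => (t:Int)) hcar
    · rw [show (((v / 2^(i+k) % 2 + a / 2^k % 2 + (v % 2^(i+k) + a * 2^i % 2^(i+k)) / 2^(i+k)) % 2 : Nat):Int)
            = (((v + a * 2^i) / 2^(i+k) % 2 : Nat):Int) from congrArg _ hdig,
          bitS_toStr (v + a * 2^i) (i+k)]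
      have hlen16 : (s :: (List.range 15).map
          (fun c => if 14 - c < i + k then bitS (v + a * 2^i) (14 - c) else bitS v (14 - c))).length = 16 := by
        rw [List.length_cons, List.length_map, List.length_range]
      rw [pySetD_pvN (s :: (List.range 15).map
            (fun c => if 14 - c < i + k then bitS (v + a * 2 ^ i) (14 - c) else bitS v (14 - c)))
            ((((14-k-i:Nat)):Int)+1) (bitS (v + a * 2 ^ i) (i + k))
            (by rw [hlen16]; omega) (by rw [hlen16]; omega)]
      have hpv : pvN (s :: (List.range 15).map
          (fun c => if 14 - c < i + k then bitS (v + a * 2^i) (14 - c) else bitS v (14 - c))).length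
            ((((14-k-i:Nat)):Int)+1) = (14-k-i)+1 := by
        rw [hlen16]; unfold pvN; split_ifs <;> omega
      rw [hpv, List.set_cons_succ]
      congr 1
      refine List.ext_getElem (by simp) ?_
      intro p hp1 hp2'
      have hp15 : p < 15 := by simpa using hp1
      rw [List.getElem_set]
      split_ifs with he
      · simp only [List.getElem_map, List.getElem_range]
        rw [if_pos (by omega), show 14 - p = i + k from by omega]
      · simp only [List.getElem_map, List.getElem_range]
        by_cases hlt' : 14 - p < i + k
        · rw [if_pos hlt', if_pos (by omega)]
        · rw [if_neg hlt', if_neg (by omega)]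

theorem inner_add (secC firstC : List String) (i : Nat) (hi : i ≤ 14) (a v : Nat) (s : String)
    (hs : s = "0" ∨ s = "1") (ha : a < 2^(15-i)) (hv : v + a * 2^i < 2^15)
    (hsec : pvInt (PySem.List.pyGetD secC (15 - (i:Int)) "") = 1)
    (hfc : firstC = "0" :: encL a) (tm : List String) (htm : tm.length = 16) :
    ((PySem.List.pyRange 0 15 1).foldl (mulInner secC firstC (i:Int)) (tm, 0, s :: encL v)).2.2
      = s :: encL (v + a * 2^i) := by
  have hsplit : PySem.List.pyRange 0 15 1
      = PySem.List.pyRange 0 ((15 - i : Nat):Int) 1 ++ PySem.List.pyRange ((15 - i : Nat):Int) 15 1 :=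
    PySem.List.pyRange_one_append 0 _ 15 (by omega) (by omega)
  rw [hsplit, List.foldl_append]
  obtain ⟨h1, h2, h3⟩ := phase1 secC firstC i hi a v s hsec hfc (15 - i) (le_refl _) tm htm
  have hvlt : v < 2^15 := by omega
  have hXlt : a * 2^i < 2^15 := by omega
  have hiex : i + (15 - i) = 15 := by omega
  rw [hiex] at h2
  have hc0 : (v % 2^15 + (a * 2^i) % 2^15) / 2^15 = 0 := by
    rw [Nat.mod_eq_of_lt hvlt, Nat.mod_eq_of_lt hXlt]
    exact Nat.div_eq_of_lt hv
  rw [hc0] at h2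
  simp only [hiex] at h3
  have hmix : (List.range 15).map
      (fun c => if 14 - c < 15 then bitS (v + a*2^i) (14-c) else bitS v (14-c))
      = encL (v + a * 2^i) := by
    unfold encL
    refine List.map_congr_left ?_
    intro c hc
    rw [if_pos (by have := List.mem_range.mp hc; omega)]
  rw [hmix] at h3
  set R := (PySem.List.pyRange 0 ((15 - i : Nat):Int) 1).foldl (mulInner secC firstC (i:Int))
      (tm, 0, s :: encL v) with hRdef
  have h2' : R.2.1 = (0:Int) := by rw [h2]; norm_num
  have hRR : R = (R.1, (0:Int), s :: encL (v + a * 2^i)) := by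
    rw [← h2', ← h3]
  rw [hRR]
  have hzero : ∀ index : Int, 1 ≤ index → index ≤ 15 - ((15 - i : Nat):Int) →
      pvInt (PySem.List.pyGetD secC (15 - (i:Int)) "") * pvInt (PySem.List.pyGetD firstC index "") = 0 := by
    intro index hx1 hx2
    have hxi : index ≤ (i:Int) := by omega
    rw [hsec, one_mul, hfc]
    rw [show index = (((index.toNat - 1 : Nat)):Int)+1 from by omega]
    rw [pyGetD_cons15 _ _ (encL_length a) _ (by omega), encL_getElem _ _ (by omega)]
    have hbit : a < 2^(14 - (index.toNat - 1)) :=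
      lt_of_lt_of_le ha (Nat.pow_le_pow_right (by norm_num) (by omega))
    unfold bitS
    rw [Nat.testBit_lt_two_pow hbit]
    decide
  have hcells : ∀ x ∈ s :: encL (v + a * 2^i), x = "0" ∨ x = "1" := by
    intro x hx
    rcases List.mem_cons.mp hx with h | h
    · rw [h]; exact hs
    · exact encL_mem01 h
  exact (inner_id secC firstC (i:Int) (15 - i) (by omega) (by omega) (by omega) hzero
    R.1 (s :: encL (v + a * 2^i)) h1 (by rw [List.length_cons, encL_length]) hcells).2.2

theorem pyGetD_replicate16 (j : Int) (h1 : -16 ≤ j) (h2 : j < 16) :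
    PySem.List.pyGetD (List.replicate 16 "0") j "" = "0" := by
  have hl : (List.replicate 16 "0").length = 16 := List.length_replicate
  rw [pyGetD_pvN _ _ _ (by rw [hl]; omega) (by rw [hl]; omega), List.getElem_replicate]

theorem outer_id (secC firstC : List String)
    (hz : ∀ i : Int, 0 ≤ i → i ≤ 17 → ∀ index : Int, 1 ≤ index → index ≤ 15 →
      pvInt (PySem.List.pyGetD secC (15 - i) "") * pvInt (PySem.List.pyGetD firstC index "") = 0)
    (s0 : String) (hs0 : s0 = "0" ∨ s0 = "1") :
    ∀ m : Nat, m ≤ 18 →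
    ((PySem.List.pyRange 0 (m:Int) 1).foldl
      (fun answer i => ((PySem.List.pyRange 0 15 1).foldl (mulInner secC firstC i)
        (List.replicate 16 "0", 0, answer)).2.2) (s0 :: List.replicate 15 "0"))
    = s0 :: List.replicate 15 "0" := by
  intro m
  induction m with
  | zero =>
    intro _
    rw [show ((0:Nat):Int) = 0 from rfl, PySem.List.pyRange_one_eq_nil (le_refl (0:Int)), List.foldl_nil]
  | succ m ih =>
    intro hm
    rw [show ((m+1:Nat):Int) = (m:Int)+1 from by push_cast; ring,
        PySem.List.pyRange_one_succ_right (by omega), List.foldl_append, ih (by omega),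
        List.foldl_cons, List.foldl_nil]
    have hcells : ∀ x ∈ s0 :: List.replicate 15 "0", x = "0" ∨ x = "1" := by
      intro x hx
      rcases List.mem_cons.mp hx with h | h
      · rw [h]; exact hs0
      · exact Or.inl (List.eq_of_mem_replicate h)
    have h := (inner_id secC firstC (m:Int) 0 (by omega) (by omega) (by omega)
      (fun index h1 h2 => hz (m:Int) (by omega) (by omega) index h1 (by omega))
      (List.replicate 16 "0") (s0 :: List.replicate 15 "0") List.length_replicate
      (by rw [List.length_cons, List.length_replicate]) hcells).2.2
    simp only [Nat.cast_zero] at h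
    rw [h]

theorem outer_main (secC firstC : List String) (a b : Nat)
    (hb1 : 1 ≤ b) (hb15 : b < 2^15) (hab : a * b ≤ 32767)
    (hsecC : secC = "0" :: encL b) (hfc : firstC = "0" :: encL a)
    (s0 : String) (hs0 : s0 = "0" ∨ s0 = "1") :
    ∀ m : Nat, m ≤ 15 →
    ((PySem.List.pyRange 0 (m:Int) 1).foldl
      (fun answer i => ((PySem.List.pyRange 0 15 1).foldl (mulInner secC firstC i)
        (List.replicate 16 "0", 0, answer)).2.2) (s0 :: encL 0))
    = s0 :: encL (a * (b % 2^m)) := by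
  intro m
  induction m with
  | zero =>
    intro _
    rw [show ((0:Nat):Int) = 0 from rfl, PySem.List.pyRange_one_eq_nil (le_refl (0:Int)), List.foldl_nil,
        Nat.pow_zero, Nat.mod_one, Nat.mul_zero]
  | succ m ih =>
    intro hm
    have hm14 : m ≤ 14 := by omega
    rw [show ((m+1:Nat):Int) = (m:Int)+1 from by push_cast; ring,
        PySem.List.pyRange_one_succ_right (by omega), List.foldl_append, ih (by omega),
        List.foldl_cons, List.foldl_nil]
    have hsecv : PySem.List.pyGetD secC (15 - (m:Int)) "" = bitS b m := by
      rw [hsecC, show (15 - (m:Int)) = (((14-m:Nat)):Int)+1 from by omega,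
          pyGetD_cons15 _ _ (encL_length b) (14-m) (by omega),
          encL_getElem b (14-m) (by omega), show 14 - (14-m) = m from by omega]
    by_cases hbit : b.testBit m
    · -- add step
      have hble : (2:Nat)^m ≤ b := Nat.ge_two_pow_of_testBit hbit
      have hXle : a * 2^m ≤ 32767 :=
        le_trans (Nat.mul_le_mul_left a hble) hab
      have ham : a < 2^(15-m) := by
        have h1 : a * 2^m < 2^(15-m) * 2^m := by
          rw [← pow_add, show 15 - m + m = 15 from by omega]
          omega
        exact Nat.lt_of_mul_lt_mul_right h1
      have hb2 : b / 2^m % 2 = 1 := by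
        rw [Nat.testBit_eq_decide_div_mod_eq] at hbit
        simpa using hbit
      have hmod : b % 2^(m+1) = b % 2^m + 2^m := by
        rw [Nat.mod_pow_succ, hb2, Nat.mul_one]
      have hv : a * (b % 2^m) + a * 2^m < 2^15 := by
        have hmle : b % 2^m + 2^m ≤ b := by
          rw [← hmod]; exact Nat.mod_le b (2^(m+1))
        have : a * (b % 2^m) + a * 2^m = a * (b % 2^m + 2^m) := by ring
        rw [this]
        calc a * (b % 2^m + 2^m) ≤ a * b := Nat.mul_le_mul_left a hmle
        _ ≤ 32767 := hab
        _ < 2^15 := by norm_num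
      have hsec1 : pvInt (PySem.List.pyGetD secC (15 - (m:Int)) "") = 1 := by
        rw [hsecv]
        unfold bitS
        rw [hbit]
        decide
      have h := inner_add secC firstC m (by omega) a (a * (b % 2^m)) s0 hs0 ham hv hsec1 hfc
        (List.replicate 16 "0") List.length_replicate
      rw [h]
      congr 2
      rw [hmod]
      ring
    · -- identity step
      have hb2 : b / 2^m % 2 = 0 := by
        rw [Nat.testBit_eq_decide_div_mod_eq] at hbit
        simp at hbit
        omega
      have hmod : b % 2^(m+1) = b % 2^m := by
        rw [Nat.mod_pow_succ, hb2, Nat.mul_zero, Nat.add_zero]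
      have hsec0 : pvInt (PySem.List.pyGetD secC (15 - (m:Int)) "") = 0 := by
        rw [hsecv]
        unfold bitS
        rw [Bool.eq_false_iff.mpr hbit]
        decide
      have hcells : ∀ x ∈ s0 :: encL (a * (b % 2^m)), x = "0" ∨ x = "1" := by
        intro x hx
        rcases List.mem_cons.mp hx with h | h
        · rw [h]; exact hs0
        · exact encL_mem01 h
      have h := (inner_id secC firstC (m:Int) 0 (by omega) (by omega) (by omega)
        (fun index h1 h2 => by rw [hsec0, zero_mul])
        (List.replicate 16 "0") (s0 :: encL (a * (b % 2^m))) List.length_replicate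
        (by rw [List.length_cons, encL_length]) hcells).2.2
      simp only [Nat.cast_zero] at h
      rw [h, hmod]

theorem encB (p : Nat) :
    (PySem.List.pyRange 0 15 1).map (fun k => if (p >>> (14 - k).toNat) &&& 1 = 1 then "1" else "0")
      = encL p := by
  rw [PySem.List.pyRange_one, List.map_map]
  unfold encL
  refine List.map_congr_left ?_
  intro kn hkn
  have hkn15 : kn < (15 - 0 : Int).toNat := List.mem_range.mp hkn
  have hk14 : kn ≤ 14 := by omega
  have hidx : ((14:Int) - (0 + (kn:Int))).toNat = 14 - kn := by omega
  simp only [Function.comp_apply, hidx]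
  unfold bitS
  rw [Nat.testBit_eq_decide_div_mod_eq, Nat.shiftRight_eq_div_pow, Nat.and_one_is_mod]
  by_cases h : p / 2^(14-kn) % 2 = 1
  · rw [if_pos h, if_pos (by simpa using h)]
  · rw [if_neg h, if_neg (by simpa using h)]

theorem join_cons (x : String) (l : List String) :
    PySem.Str.join "" (x :: l) = x ++ PySem.Str.join "" l := by
  rw [String.ext_iff, String.toList_append, PySem.Str.toList_join, PySem.Str.toList_join, List.map_cons]
  cases l with
  | nil => simp [PySem.Chars.join, List.intercalate]
  | cons y ys => rw [List.map_cons, PySem.Chars.join_cons_cons]; simp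

theorem after_guard (a b : Nat) (hpre18 : a = 0 → b < 262144) (hab : a * b ≤ 32767)
    (s0 : String) (hs0 : s0 = "0" ∨ s0 = "1") :
    PySem.Str.join "" ((PySem.List.pyRange 0 (PySem.Str.len (convert ((b:Nat):Int))) 1).foldl
      (fun answer i => ((PySem.List.pyRange 0 15 1).foldl
        (mulInner (to_straight_code ((b:Nat):Int)) (to_straight_code ((a:Nat):Int)) i)
        (List.replicate 16 "0", 0, answer)).2.2)
      (s0 :: List.replicate 15 "0"))
    = s0 ++ PySem.Str.join "" ((PySem.List.pyRange 0 15 1).map (fun k =>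
        if ((a*b) >>> (14 - k).toNat) &&& 1 = 1 then "1" else "0")) := by
  rw [encB]
  rw [PySem.Str.len_eq]
  set L := (convert ((b:Nat):Int)).toList.length with hLdef
  obtain ⟨hL1, hbL, -, -⟩ := convert_rev b
  rcases Nat.eq_zero_or_pos b with hb0 | hb1
  · -- b = 0 : the single outer iteration is an identity pass
    subst hb0
    rw [Nat.mul_zero]
    have hL0 : L = 1 := by
      rw [hLdef, show ((0:Nat):Int) = 0 from rfl, convert_zero]
      decide
    rw [hL0]
    have hid := outer_id (to_straight_code ((0:Nat):Int)) (to_straight_code ((a:Nat):Int))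
      (fun i hi0 hi17 index h1 h2 => by
        rw [show to_straight_code ((0:Nat):Int) = List.replicate 16 "0" from by
              rw [show ((0:Nat):Int) = 0 from rfl]; exact tsc_zero,
            pyGetD_replicate16 (15 - i) (by omega) (by omega), pvInt_zero, zero_mul])
      s0 hs0 1 (by omega)
    rw [hid, join_cons, encL_zero]
  · rcases Nat.lt_or_ge 32767 b with hbig | hble
    · -- b > 32767 forces a = 0 : every outer iteration is an identity pass
      have ha0 : a = 0 := by
        by_contra hne
        have h1 : 1 ≤ a := by omega
        have := Nat.le_mul_of_pos_left b (show 0 < a by omega)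
        omega
      subst ha0
      rw [Nat.zero_mul]
      have hb18 : b < 262144 := hpre18 rfl
      have hL18 : L ≤ 18 := convert_len_le b 18 (by omega) (by norm_num)
      have hid := outer_id (to_straight_code ((b:Nat):Int)) (to_straight_code ((0:Nat):Int))
        (fun i hi0 hi17 index h1 h2 => by
          rw [show to_straight_code ((0:Nat):Int) = List.replicate 16 "0" from by
                rw [show ((0:Nat):Int) = 0 from rfl]; exact tsc_zero,
              pyGetD_replicate16 index (by omega) (by omega), pvInt_zero, mul_zero])
        s0 hs0 L hL18
      rw [hid, join_cons, encL_zero]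
    · -- main case : 1 ≤ b ≤ 32767
      have ha15 : a < 2^15 := by
        have : a ≤ a * b := Nat.le_mul_of_pos_right a hb1
        omega
      have hb15 : b < 2^15 := by omega
      have hL15 : L ≤ 15 := convert_len_le b 15 hb15 (by norm_num)
      rw [show (List.replicate 15 "0") = encL 0 from encL_zero.symm]
      rw [outer_main (to_straight_code ((b:Nat):Int)) (to_straight_code ((a:Nat):Int)) a b hb1 hb15 hab
            (tsc_eq b hb15) (tsc_eq a ha15) s0 hs0 L hL15]
      rw [show b % 2^L = b from Nat.mod_eq_of_lt hbL]
      rw [join_cons]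

theorem multiplication_spec : Claim_equal_multiplication := by
  intro f s hdom hpre
  unfold Spec_multiplication multiplication multiplication_alt
  dsimp only
  have habf : |f| = ((f.natAbs : Nat) : Int) := f.abs_eq_natAbs
  have habs : |s| = ((s.natAbs : Nat) : Int) := s.abs_eq_natAbs
  rw [habf, habs]
  have habp2 : |((f.natAbs:Int) * (s.natAbs:Int))| = ((f.natAbs * s.natAbs : Nat) : Int) := by
    rw [abs_of_nonneg (by positivity)]
    push_cast
    ring
  have hpre' : f.natAbs = 0 → s.natAbs < 262144 := by
    intro h0
    have hf0 : f = 0 := Int.natAbs_eq_zero.mp h0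
    unfold Pre_multiplication at hpre
    omega
  by_cases hgt : 32767 < f.natAbs * s.natAbs
  · rw [if_pos (c := ((32767:Int) < |((f.natAbs:Int) * (s.natAbs:Int))|))
          (by rw [habp2]; exact_mod_cast hgt),
        if_pos (c := (32767 < f.natAbs * s.natAbs)) hgt]
  · push_neg at hgt
    rw [if_neg (c := ((32767:Int) < |((f.natAbs:Int) * (s.natAbs:Int))|))
          (by rw [habp2]; intro hc; exact absurd (by exact_mod_cast hc : 32767 < f.natAbs * s.natAbs) (by omega)),
        if_neg (c := (32767 < f.natAbs * s.natAbs)) (by omega)]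
    by_cases hf : f < 0 <;> by_cases hs2 : s < 0
    · rw [if_pos (c := (f < 0 ∨ s < 0)) (Or.inl hf), if_pos (c := (f < 0 ∧ s < 0)) ⟨hf, hs2⟩]
      rw [show PySem.List.pySetD (PySem.List.pySetD (List.replicate 16 "0") 0 "1") 0 "0"
            = "0" :: List.replicate 15 "0" from by decide]
      rw [show (if (decide (f < 0)) != (decide (s < 0)) then "1" else "0") = "0" from by simp [hf, hs2]]
      exact after_guard f.natAbs s.natAbs hpre' hgt "0" (Or.inl rfl)
    · rw [if_pos (c := (f < 0 ∨ s < 0)) (Or.inl hf), if_neg (c := (f < 0 ∧ s < 0)) (by tauto)]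
      rw [show PySem.List.pySetD (List.replicate 16 "0") 0 "1"
            = "1" :: List.replicate 15 "0" from by decide]
      rw [show (if (decide (f < 0)) != (decide (s < 0)) then "1" else "0") = "1" from by simp [hf, hs2]]
      exact after_guard f.natAbs s.natAbs hpre' hgt "1" (Or.inr rfl)
    · rw [if_pos (c := (f < 0 ∨ s < 0)) (Or.inr hs2), if_neg (c := (f < 0 ∧ s < 0)) (by tauto)]
      rw [show PySem.List.pySetD (List.replicate 16 "0") 0 "1"
            = "1" :: List.replicate 15 "0" from by decide]
      rw [show (if (decide (f < 0)) != (decide (s < 0)) then "1" else "0") = "1" from by simp [hf, hs2]]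
      exact after_guard f.natAbs s.natAbs hpre' hgt "1" (Or.inr rfl)
    · rw [if_neg (c := (f < 0 ∨ s < 0)) (by tauto), if_neg (c := (f < 0 ∧ s < 0)) (by tauto)]
      rw [show (List.replicate 16 "0") = "0" :: List.replicate 15 "0" from by decide]
      rw [show (if (decide (f < 0)) != (decide (s < 0)) then "1" else "0") = "0" from by simp [hf, hs2]]
      exact after_guard f.natAbs s.natAbs hpre' hgt "0" (Or.inl rfl)
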